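-- pv_equiv track=rewrite | github.com/mihir965/ai_project_1 | Bot/bot4_MCTS.py | rollout_policy
-- ===== SOURCE A (Python) =====
-- def rollout_policy(bot_pos, possible_actions, dest):
--     distances = []
--     for action in possible_actions:
--         new_pos = (bot_pos[0] + action[0], bot_pos[1]+action[1])
--         distance = abs(new_pos[0] - dest[0]) + abs(new_pos[1] - dest[1])
--         distances.append((distance, action))
--     distances.sort()
--     return distances[0][1]
-- ===== SOURCE B (Python) =====
-- def rollout_policy(bot_pos, possible_actions, dest):
--     best = possible_actions[0]
--     best_key = (abs(bot_pos[0] + best[0] - dest[0]) + abs(bot_pos[1] + best[1] - dest[1]), best)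
--     for action in possible_actions[1:]:
--         key = (abs(bot_pos[0] + action[0] - dest[0]) + abs(bot_pos[1] + action[1] - dest[1]), action)
--         if key < best_key:
--             best, best_key = action, key
--     return best
-- ===== Notes on version B (the rewrite author's own statement) =====
-- stated objective: faster
-- what changed: Replaced building a (distance, action) list and fully sorting it with a single linear scan that keeps the (distance, action)-lexicographically smallest action.
import Mathlib
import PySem

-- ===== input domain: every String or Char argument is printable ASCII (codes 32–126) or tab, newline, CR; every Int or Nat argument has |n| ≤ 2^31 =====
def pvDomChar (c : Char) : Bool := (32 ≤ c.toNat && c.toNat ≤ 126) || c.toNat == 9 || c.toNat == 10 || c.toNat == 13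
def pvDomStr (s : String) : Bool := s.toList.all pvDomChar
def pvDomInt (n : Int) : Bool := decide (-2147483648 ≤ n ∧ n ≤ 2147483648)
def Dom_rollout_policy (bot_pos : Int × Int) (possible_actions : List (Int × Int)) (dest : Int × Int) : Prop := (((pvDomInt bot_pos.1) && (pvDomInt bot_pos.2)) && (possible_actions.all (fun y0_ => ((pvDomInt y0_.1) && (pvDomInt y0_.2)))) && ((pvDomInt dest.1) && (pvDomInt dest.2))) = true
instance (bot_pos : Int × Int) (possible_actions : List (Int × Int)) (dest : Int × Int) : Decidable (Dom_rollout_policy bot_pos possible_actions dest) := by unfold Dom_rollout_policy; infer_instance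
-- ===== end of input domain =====

-- B replaces A's build-list-then-sort with a single linear minimum-selection scan (same value, same tie-break).


-- ===== PORT A =====
-- Python compares the tuples (distance, action) lexicographically; `Int ×ₗ Int ×ₗ Int`
-- carries exactly that lexicographic order, so the sort key embeds each pair into it.
def rollout_policy (bot_pos : Int × Int) (possible_actions : List (Int × Int)) (dest : Int × Int) : Int × Int :=
  let distances : List (Int × (Int × Int)) :=
    possible_actions.foldl (fun acc action =>
      acc ++ [((|bot_pos.1 + action.1 - dest.1| + |bot_pos.2 + action.2 - dest.2|), action)]) []
  let sorted := PySem.List.sorted distances (fun p => toLex (p.1, toLex (p.2.1, p.2.2))) false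
  match PySem.List.pyGet? sorted 0 with
  | some p => p.2
  | none => (0, 0)   -- distances[0] raises IndexError in Python: excluded by Pre_

-- ===== PORT B =====
def rollout_policy_alt (bot_pos : Int × Int) (possible_actions : List (Int × Int)) (dest : Int × Int) : Int × Int :=
  match PySem.List.pyGet? possible_actions 0 with
  | none => (0, 0)   -- possible_actions[0] raises IndexError in Python: excluded by Pre_
  | some b0 =>
    let key := fun (a : Int × Int) =>
      toLex ((|bot_pos.1 + a.1 - dest.1| + |bot_pos.2 + a.2 - dest.2| : Int), toLex (a.1, a.2))
    ((PySem.List.slice possible_actions (some 1) none).foldl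
      (fun (st : (Int × Int) × (Int ×ₗ Int ×ₗ Int)) action =>
        if key action < st.2 then (action, key action) else st)
      (b0, key b0)).1

-- ===== PRECONDITION & SPEC =====
-- Pre_ excludes only the empty action list, on which both Pythons raise IndexError.
def Pre_rollout_policy (bot_pos : Int × Int) (possible_actions : List (Int × Int)) (dest : Int × Int) : Prop := possible_actions ≠ []
instance (bot_pos : Int × Int) (possible_actions : List (Int × Int)) (dest : Int × Int) : Decidable (Pre_rollout_policy bot_pos possible_actions dest) := by unfold Pre_rollout_policy; infer_instance
def pvWitness_rollout_policy : (Int × Int) × (List (Int × Int)) × (Int × Int) := ((0, 0), [(1, 0), (0, 1)], (3, 2))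

def Spec_rollout_policy (bot_pos : Int × Int) (possible_actions : List (Int × Int)) (dest : Int × Int) (out : Int × Int) : Prop := out = rollout_policy_alt bot_pos possible_actions dest
instance (bot_pos : Int × Int) (possible_actions : List (Int × Int)) (dest : Int × Int) (out : Int × Int) : Decidable (Spec_rollout_policy bot_pos possible_actions dest out) := by unfold Spec_rollout_policy; infer_instance

-- ===== CLAIM (what is proved, stated in full; the proofs are below) =====
def Claim_equal_rollout_policy : Prop := ∀ (bot_pos : Int × Int) (possible_actions : List (Int × Int)) (dest : Int × Int), Dom_rollout_policy bot_pos possible_actions dest → Pre_rollout_policy bot_pos possible_actions dest → Spec_rollout_policy bot_pos possible_actions dest (rollout_policy bot_pos possible_actions dest)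

-- ===== LEMMAS AND PROOFS =====

-- the shared lexicographic key (proof-side abbreviation; both ports inline it)
def pvKey (bot_pos dest : Int × Int) (a : Int × Int) : Int ×ₗ Int ×ₗ Int :=
  toLex ((|bot_pos.1 + a.1 - dest.1| + |bot_pos.2 + a.2 - dest.2| : Int), toLex (a.1, a.2))

theorem pvKey_inj (bot_pos dest : Int × Int) {a b : Int × Int}
    (h : pvKey bot_pos dest a = pvKey bot_pos dest b) : a = b := by
  unfold pvKey at h
  have h2 := congrArg (fun x => (ofLex x).2) h
  simp at h2
  have h3 := congrArg (fun x => (ofLex x).1) h2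
  have h4 := congrArg (fun x => (ofLex x).2) h2
  simp at h3 h4
  exact Prod.ext h3 h4

-- B's fold returns a member whose key is minimal
theorem pvFold_min (bot_pos dest : Int × Int) (b0 : Int × Int) (rest : List (Int × Int)) :
    let key := pvKey bot_pos dest
    let r := rest.foldl
      (fun (st : (Int × Int) × (Int ×ₗ Int ×ₗ Int)) action =>
        if key action < st.2 then (action, key action) else st) (b0, key b0)
    r.2 = key r.1 ∧ r.1 ∈ b0 :: rest ∧ ∀ y ∈ b0 :: rest, key r.1 ≤ key y := by
  intro key
  induction rest generalizing b0 with
  | nil => simp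
  | cons x xs ih =>
    simp only [List.foldl_cons]
    by_cases h : key x < key b0
    · simp only [if_pos h]
      obtain ⟨hk, hm, hle⟩ := ih x
      refine ⟨hk, ?_, ?_⟩
      · rcases List.mem_cons.mp hm with h1 | h1 <;> simp [h1]
      · intro y hy
        rcases List.mem_cons.mp hy with rfl | hy'
        · exact le_of_lt (lt_of_le_of_lt (hle x (by simp)) h)
        · rcases List.mem_cons.mp hy' with rfl | hy''
          · exact hle y (by simp)
          · exact hle y (by simp [hy''])
    · simp only [if_neg h]
      obtain ⟨hk, hm, hle⟩ := ih b0
      refine ⟨hk, ?_, ?_⟩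
      · rcases List.mem_cons.mp hm with h1 | h1 <;> simp [h1]
      · intro y hy
        rcases List.mem_cons.mp hy with rfl | hy'
        · exact hle y (by simp)
        · rcases List.mem_cons.mp hy' with rfl | hy''
          · exact le_trans (hle b0 (by simp)) (not_lt.mp h)
          · exact hle y (by simp [hy''])

-- A's distances list is the map of the key-pairing over the actions
theorem pvDistances_eq (bot_pos dest : Int × Int) (pas : List (Int × Int)) :
    pas.foldl (fun acc action =>
      acc ++ [((|bot_pos.1 + action.1 - dest.1| + |bot_pos.2 + action.2 - dest.2|), action)]) []
    = pas.map (fun a => ((|bot_pos.1 + a.1 - dest.1| + |bot_pos.2 + a.2 - dest.2| : Int), a)) := by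
  simpa using PySem.List.foldl_append_singleton_eq_map
    (fun a => ((|bot_pos.1 + a.1 - dest.1| + |bot_pos.2 + a.2 - dest.2| : Int), a)) pas []

-- ===== VERDICT (by name: the statement is the Claim_ definition above) =====
theorem rollout_policy_spec : Claim_equal_rollout_policy := by
  intro bot_pos pas dest _ hpre
  unfold Spec_rollout_policy rollout_policy rollout_policy_alt
  simp only [pvDistances_eq]
  obtain ⟨b0, rest, rfl⟩ := List.exists_cons_of_ne_nil hpre
  set key := pvKey bot_pos dest with hkey
  set d := fun (a : Int × Int) => (|bot_pos.1 + a.1 - dest.1| + |bot_pos.2 + a.2 - dest.2| : Int) with hd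
  -- A side: head of sorted list
  have hnil : PySem.List.sorted ((b0 :: rest).map (fun a => (d a, a)))
      (fun p => toLex (p.1, toLex (p.2.1, p.2.2))) false ≠ [] := by
    intro h
    rw [PySem.List.sorted_eq_nil_iff] at h
    simp at h
  obtain ⟨m, tl, hm⟩ := List.exists_cons_of_ne_nil hnil
  have hmmem : m ∈ (b0 :: rest).map (fun a => (d a, a)) := by
    have := PySem.List.mem_sorted (xs := (b0 :: rest).map (fun a => (d a, a)))
      (key := fun p => toLex (p.1, toLex (p.2.1, p.2.2))) (rev := false) (x := m)
    rw [hm] at this; exact this.mp (by simp)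
  have hmin : ∀ y ∈ (b0 :: rest).map (fun a => (d a, a)),
      toLex (m.1, toLex (m.2.1, m.2.2)) ≤ toLex (y.1, toLex (y.2.1, y.2.2)) :=
    PySem.List.key_head_sorted_le _ _ hm
  obtain ⟨a, hamem, hae⟩ := List.mem_map.mp hmmem
  -- key of a mapped element is pvKey of its action
  have hkeyeq : ∀ z : Int × Int, toLex (((d z, z) : Int × (Int × Int)).1,
      toLex (((d z, z) : Int × (Int × Int)).2.1, ((d z, z) : Int × (Int × Int)).2.2)) = key z := by
    intro z; rfl
  have hamin : ∀ b ∈ b0 :: rest, key a ≤ key b := by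
    intro b hb
    have := hmin (d b, b) (List.mem_map.mpr ⟨b, hb, rfl⟩)
    rw [← hae, hkeyeq, hkeyeq] at this
    exact this
  -- B side
  have hB := pvFold_min bot_pos dest b0 rest
  obtain ⟨_, hrmem, hrmin⟩ := hB
  set r := rest.foldl
    (fun (st : (Int × Int) × (Int ×ₗ Int ×ₗ Int)) action =>
      if key action < st.2 then (action, key action) else st) (b0, key b0) with hr
  -- both are the unique minimum
  have h1 : key a ≤ key r.1 := hamin r.1 hrmem
  have h2 : key r.1 ≤ key a := hrmin a hamem
  have : a = r.1 := pvKey_inj bot_pos dest (le_antisymm h1 h2)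
  -- finish: reduce both sides
  rw [hm]
  simp only [PySem.List.pyGet?_zero_cons, PySem.List.slice_from_one, List.tail_cons]
  rw [← hae]
  exact this
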